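-- pv_equiv track=rewrite | github.com/khanhlinh-jnf/Hashiwokakero | helper/brute_force.py | checkValidAnswer
-- ===== SOURCE A (Python) =====
-- def checkValidAnswer(cnf, hashTable):
--     for clause in cnf:
--         satisfied = False
--         for literal in clause:
--             if literal > 0:
--                 if literal in hashTable and hashTable[literal] == True:
--                     satisfied = True
--                     break
--             else:  # literal < 0
--                 neg_literal = -literal
--                 if neg_literal in hashTable and hashTable[neg_literal] == False:
--                     satisfied = True
--                     break
--         if not satisfied:
--             return False
--     return True
-- ===== SOURCE B (Python) =====
-- def checkValidAnswer(cnf, hashTable):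
--     # Inverted index: map each variable to the clauses a True/False assignment satisfies,
--     # then mark satisfied clauses driven by the assignment and check full coverage.
--     pos_idx = {}
--     neg_idx = {}
--     for i, clause in enumerate(cnf):
--         for l in clause:
--             if l > 0:
--                 pos_idx.setdefault(l, []).append(i)
--             else:
--                 neg_idx.setdefault(-l, []).append(i)
--     satisfied = set()
--     for v, val in hashTable.items():
--         if val == True:
--             satisfied.update(pos_idx.get(v, ()))
--         elif val == False:
--             satisfied.update(neg_idx.get(v, ()))
--     return len(satisfied) == len(cnf)
-- ===== Notes on version B (the rewrite author's own statement) =====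
-- stated objective: alternative
-- what changed: B replaces A's per-clause short-circuit scan with an inverted index: one pass over cnf builds literal-to-clause-index maps, one pass over the assignment marks the set of satisfied clause indices, and the answer is a coverage count (len(satisfied) == len(cnf)) -- no clause is ever scanned against the assignment.
import Mathlib
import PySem

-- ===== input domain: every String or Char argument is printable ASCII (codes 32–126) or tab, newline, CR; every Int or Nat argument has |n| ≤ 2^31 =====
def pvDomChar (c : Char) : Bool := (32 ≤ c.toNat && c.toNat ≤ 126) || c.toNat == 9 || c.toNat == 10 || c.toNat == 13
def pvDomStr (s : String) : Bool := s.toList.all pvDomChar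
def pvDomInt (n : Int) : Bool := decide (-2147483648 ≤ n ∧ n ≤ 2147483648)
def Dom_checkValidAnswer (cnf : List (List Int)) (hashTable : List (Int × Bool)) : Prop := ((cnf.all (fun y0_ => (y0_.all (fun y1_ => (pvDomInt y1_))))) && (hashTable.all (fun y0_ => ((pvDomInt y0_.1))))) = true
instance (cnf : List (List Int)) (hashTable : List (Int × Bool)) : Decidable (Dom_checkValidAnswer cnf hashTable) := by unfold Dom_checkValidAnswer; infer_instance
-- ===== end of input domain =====

-- B replaces A's per-clause scan by an inverted literal->clause-index map plus a coverage count; equivalence proved for assignments with distinct keys (the Python-dict invariant).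


-- ===== PORT A =====
-- 'literal in hashTable and hashTable[literal] == True' = dict lookup, then compare
def checkValidAnswer (cnf : List (List Int)) (hashTable : List (Int × Bool)) : Bool :=
  cnf.all (fun clause =>
    clause.any (fun literal =>
      if literal > 0 then
        match PySem.Dict.get? (PySem.Dict.mk hashTable) literal with
        | some b => b == true
        | none => false
      else
        match PySem.Dict.get? (PySem.Dict.mk hashTable) (-literal) with
        | some b => b == false
        | none => false))

-- ===== PORT B =====
-- pos_idx / neg_idx: variable -> indices of the clauses a True / False assignment to it
-- satisfies (setdefault(k, []).append(i) = Dict.modify k [] (· ++ [i]))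
def pvBuildIdx (cnf : List (List Int)) : PySem.Dict Int (List Int) × PySem.Dict Int (List Int) :=
  (PySem.List.enumerate cnf 0).foldl
    (fun pn ic =>
      ic.2.foldl
        (fun pn l =>
          if l > 0 then (pn.1.modify l [] (· ++ [ic.1]), pn.2)
          else (pn.1, pn.2.modify (-l) [] (· ++ [ic.1])))
        pn)
    (PySem.Dict.empty, PySem.Dict.empty)

def checkValidAnswer_alt (cnf : List (List Int)) (hashTable : List (Int × Bool)) : Bool :=
  let pn := pvBuildIdx cnf
  let satisfied : PySem.Set Int :=
    hashTable.foldl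
      (fun s kv =>
        if kv.2 then PySem.Set.update s (pn.1.getD kv.1 [])
        else PySem.Set.update s (pn.2.getD kv.1 []))
      PySem.Set.empty
  satisfied.length == cnf.length

-- ===== PRECONDITION & SPEC =====
-- Pre_: the keys of hashTable are pairwise distinct — the invariant every Python dict satisfies;
-- it excludes no input reachable from Python (a dict cannot carry duplicate keys).
def Pre_checkValidAnswer (cnf : List (List Int)) (hashTable : List (Int × Bool)) : Prop :=
  (hashTable.map Prod.fst).Nodup
instance (cnf : List (List Int)) (hashTable : List (Int × Bool)) : Decidable (Pre_checkValidAnswer cnf hashTable) := by unfold Pre_checkValidAnswer; infer_instance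
def pvWitness_checkValidAnswer : List (List Int) × (List (Int × Bool)) :=
  ([[1, -2], [-1]], [(1, true), (2, false)])
def Spec_checkValidAnswer (cnf : List (List Int)) (hashTable : List (Int × Bool)) (out : Bool) : Prop := out = checkValidAnswer_alt cnf hashTable
instance (cnf : List (List Int)) (hashTable : List (Int × Bool)) (out : Bool) : Decidable (Spec_checkValidAnswer cnf hashTable out) := by unfold Spec_checkValidAnswer; infer_instance

-- ===== CLAIM (what is proved, stated in full; the proofs are below) =====
def Claim_equal_checkValidAnswer : Prop := ∀ (cnf : List (List Int)) (hashTable : List (Int × Bool)), Dom_checkValidAnswer cnf hashTable → Pre_checkValidAnswer cnf hashTable → Spec_checkValidAnswer cnf hashTable (checkValidAnswer cnf hashTable)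

-- ===== LEMMAS AND PROOFS =====

-- inner loop of the index build: effect of one clause on the two getD lists
theorem pv_inner (clause : List Int) (pn : PySem.Dict Int (List Int) × PySem.Dict Int (List Int)) (i v j : Int) :
    (j ∈ ((clause.foldl (fun pn l =>
          if l > 0 then (pn.1.modify l [] (· ++ [i]), pn.2)
          else (pn.1, pn.2.modify (-l) [] (· ++ [i]))) pn).1.getD v [])
      ↔ j ∈ pn.1.getD v [] ∨ (j = i ∧ ∃ l ∈ clause, l > 0 ∧ l = v))
  ∧ (j ∈ ((clause.foldl (fun pn l =>
          if l > 0 then (pn.1.modify l [] (· ++ [i]), pn.2)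
          else (pn.1, pn.2.modify (-l) [] (· ++ [i]))) pn).2.getD v [])
      ↔ j ∈ pn.2.getD v [] ∨ (j = i ∧ ∃ l ∈ clause, ¬ l > 0 ∧ -l = v)) := by
  induction clause generalizing pn with
  | nil => simp
  | cons c rest ih =>
    simp only [List.foldl_cons]
    by_cases hc : c > 0
    · simp only [hc, if_true]
      constructor
      · rw [(ih _).1, PySem.Dict.getD_modify]
        by_cases hv : v = c
        · subst hv; simp [hc, List.mem_cons]; tauto
        · simp only [hv, if_false, List.mem_cons]
          constructor
          · rintro (h | ⟨hj, l, hl, hp, rfl⟩)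
            · exact Or.inl h
            · exact Or.inr ⟨hj, l, Or.inr hl, hp, rfl⟩
          · rintro (h | ⟨hj, l, (rfl | hl), hp, rfl⟩)
            · exact Or.inl h
            · exact absurd rfl hv
            · exact Or.inr ⟨hj, l, hl, hp, rfl⟩
      · rw [(ih _).2]
        constructor
        · rintro (h | ⟨hj, l, hl, hp, rfl⟩)
          · exact Or.inl h
          · exact Or.inr ⟨hj, l, List.mem_cons_of_mem _ hl, hp, rfl⟩
        · rintro (h | ⟨hj, l, hl, hp, rfl⟩)
          · exact Or.inl h
          · rcases List.mem_cons.1 hl with rfl | hl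
            · exact absurd hc hp
            · exact Or.inr ⟨hj, l, hl, hp, rfl⟩
    · simp only [hc, if_false]
      constructor
      · rw [(ih _).1]
        constructor
        · rintro (h | ⟨hj, l, hl, hp, rfl⟩)
          · exact Or.inl h
          · exact Or.inr ⟨hj, l, List.mem_cons_of_mem _ hl, hp, rfl⟩
        · rintro (h | ⟨hj, l, hl, hp, rfl⟩)
          · exact Or.inl h
          · rcases List.mem_cons.1 hl with rfl | hl
            · exact absurd hp hc
            · exact Or.inr ⟨hj, l, hl, hp, rfl⟩
      · rw [(ih _).2, PySem.Dict.getD_modify]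
        by_cases hv : v = -c
        · subst hv
          rw [if_pos rfl]
          simp only [List.mem_append, List.mem_cons, List.not_mem_nil, or_false]
          constructor
          · rintro ((h | rfl) | ⟨hj, l, hl, hp, h2⟩)
            · exact Or.inl h
            · exact Or.inr ⟨rfl, c, Or.inl rfl, hc, rfl⟩
            · exact Or.inr ⟨hj, l, Or.inr hl, hp, h2⟩
          · rintro (h | ⟨hj, l, (rfl | hl), hp, h2⟩)
            · exact Or.inl (Or.inl h)
            · exact Or.inl (Or.inr hj)
            · exact Or.inr ⟨hj, l, hl, hp, h2⟩
        · simp only [if_neg hv, List.mem_cons]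
          constructor
          · rintro (h | ⟨hj, l, hl, hp, rfl⟩)
            · exact Or.inl h
            · exact Or.inr ⟨hj, l, Or.inr hl, hp, rfl⟩
          · rintro (h | ⟨hj, l, (rfl | hl), hp, h2⟩)
            · exact Or.inl h
            · exact absurd h2.symm hv
            · exact Or.inr ⟨hj, l, hl, hp, h2⟩

-- outer loop of the index build over enumerate(cnf, s)
theorem pv_outer (cnf : List (List Int)) (s : Int)
    (pn : PySem.Dict Int (List Int) × PySem.Dict Int (List Int)) (v j : Int) :
    (j ∈ ((PySem.List.enumerate cnf s).foldl
        (fun pn ic =>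
          ic.2.foldl
            (fun pn l =>
              if l > 0 then (pn.1.modify l [] (· ++ [ic.1]), pn.2)
              else (pn.1, pn.2.modify (-l) [] (· ++ [ic.1])))
            pn)
        pn).1.getD v []
      ↔ j ∈ pn.1.getD v [] ∨ ∃ k : Nat, ∃ h : k < cnf.length, j = s + k ∧ ∃ l ∈ cnf[k], l > 0 ∧ l = v)
  ∧ (j ∈ ((PySem.List.enumerate cnf s).foldl
        (fun pn ic =>
          ic.2.foldl
            (fun pn l =>
              if l > 0 then (pn.1.modify l [] (· ++ [ic.1]), pn.2)
              else (pn.1, pn.2.modify (-l) [] (· ++ [ic.1])))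
            pn)
        pn).2.getD v []
      ↔ j ∈ pn.2.getD v [] ∨ ∃ k : Nat, ∃ h : k < cnf.length, j = s + k ∧ ∃ l ∈ cnf[k], ¬ l > 0 ∧ -l = v) := by
  induction cnf generalizing s pn with
  | nil => simp [PySem.List.enumerate_nil]
  | cons c rest ih =>
    rw [PySem.List.enumerate_cons]
    simp only [List.foldl_cons]
    constructor
    · rw [(ih (s+1) _).1, (pv_inner c pn s v j).1]
      constructor
      · rintro ((h | ⟨hj, hex⟩) | ⟨k, hk, hj, hex⟩)
        · exact Or.inl h
        · exact Or.inr ⟨0, by simp, by simpa using hj, by simpa using hex⟩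
        · exact Or.inr ⟨k+1, by simpa using hk, by omega, by simpa using hex⟩
      · rintro (h | ⟨k, hk, hj, hex⟩)
        · exact Or.inl (Or.inl h)
        · cases k with
          | zero => exact Or.inl (Or.inr ⟨by omega, by simpa using hex⟩)
          | succ k => exact Or.inr ⟨k, by simpa using hk, by omega, by simpa using hex⟩
    · rw [(ih (s+1) _).2, (pv_inner c pn s v j).2]
      constructor
      · rintro ((h | ⟨hj, hex⟩) | ⟨k, hk, hj, hex⟩)
        · exact Or.inl h
        · exact Or.inr ⟨0, by simp, by simpa using hj, by simpa using hex⟩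
        · exact Or.inr ⟨k+1, by simpa using hk, by omega, by simpa using hex⟩
      · rintro (h | ⟨k, hk, hj, hex⟩)
        · exact Or.inl (Or.inl h)
        · cases k with
          | zero => exact Or.inl (Or.inr ⟨by omega, by simpa using hex⟩)
          | succ k => exact Or.inr ⟨k, by simpa using hk, by omega, by simpa using hex⟩

-- membership in the marking loop's set
theorem pv_sat_mem (ht : List (Int × Bool)) (P N : PySem.Dict Int (List Int)) (s0 : PySem.Set Int) (j : Int) :
    j ∈ ht.foldl (fun s kv => if kv.2 then PySem.Set.update s (P.getD kv.1 []) else PySem.Set.update s (N.getD kv.1 [])) s0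
      ↔ j ∈ s0 ∨ ∃ kv ∈ ht, j ∈ (if kv.2 then P.getD kv.1 [] else N.getD kv.1 []) := by
  induction ht generalizing s0 with
  | nil => simp
  | cons kv rest ih =>
    simp only [List.foldl_cons]
    by_cases hb : kv.2
    · rw [if_pos hb]
      rw [ih, PySem.Set.mem_update]
      simp only [List.mem_cons]
      constructor
      · rintro ((h | h) | ⟨p, hp, h⟩)
        · exact Or.inl h
        · exact Or.inr ⟨kv, Or.inl rfl, by simpa [hb] using h⟩
        · exact Or.inr ⟨p, Or.inr hp, h⟩
      · rintro (h | ⟨p, (rfl | hp), h⟩)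
        · exact Or.inl (Or.inl h)
        · exact Or.inl (Or.inr (by simpa [hb] using h))
        · exact Or.inr ⟨p, hp, h⟩
    · rw [if_neg hb]
      rw [ih, PySem.Set.mem_update]
      simp only [List.mem_cons]
      constructor
      · rintro ((h | h) | ⟨p, hp, h⟩)
        · exact Or.inl h
        · exact Or.inr ⟨kv, Or.inl rfl, by simp only [if_neg hb]; exact h⟩
        · exact Or.inr ⟨p, Or.inr hp, h⟩
      · rintro (h | ⟨p, (rfl | hp), h⟩)
        · exact Or.inl (Or.inl h)
        · exact Or.inl (Or.inr (by simpa [hb] using h))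
        · exact Or.inr ⟨p, hp, h⟩

theorem pv_sat_nodup (ht : List (Int × Bool)) (P N : PySem.Dict Int (List Int)) (s0 : PySem.Set Int) (h : s0.Nodup) :
    (ht.foldl (fun s kv => if kv.2 then PySem.Set.update s (P.getD kv.1 []) else PySem.Set.update s (N.getD kv.1 [])) s0).Nodup := by
  induction ht generalizing s0 with
  | nil => exact h
  | cons kv rest ih =>
    simp only [List.foldl_cons]
    by_cases hb : kv.2
    · rw [if_pos hb]; exact ih _ (PySem.Set.nodup_update _ _ h)
    · rw [if_neg hb]; exact ih _ (PySem.Set.nodup_update _ _ h)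

-- first-match lookup on a nodup-keyed assoc list is just membership of the pair
theorem pv_get?_eq (ht : List (Int × Bool)) (hnd : (ht.map Prod.fst).Nodup) (v : Int) (b : Bool) :
    (PySem.Dict.get? (PySem.Dict.mk ht) v = some b) ↔ (v, b) ∈ ht := by
  induction ht with
  | nil => simp [PySem.Dict.get?]
  | cons kv rest ih =>
    obtain ⟨k, c⟩ := kv
    simp only [List.map_cons, List.nodup_cons] at hnd
    rw [PySem.Dict.get?_mk_cons]
    by_cases hk : k = v
    · subst hk
      simp only [beq_self_eq_true, if_true, List.mem_cons]
      constructor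
      · rintro h; exact Or.inl (by simpa using h.symm)
      · rintro (h | h)
        · simpa using congrArg Prod.snd h.symm
        · exact absurd (List.mem_map_of_mem (f := Prod.fst) h) (by simpa using hnd.1)
    · simp only [beq_iff_eq, hk, if_false, List.mem_cons]
      rw [ih hnd.2]
      constructor
      · exact Or.inr
      · rintro (h | h)
        · exact absurd (congrArg Prod.fst h).symm hk
        · exact h

-- A's literal test, characterised as pair membership (distinct keys)
theorem pv_lit_iff (ht : List (Int × Bool)) (hnd : (ht.map Prod.fst).Nodup) (l : Int) :
    ((if l > 0 then
        match PySem.Dict.get? (PySem.Dict.mk ht) l with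
        | some b => b == true
        | none => false
      else
        match PySem.Dict.get? (PySem.Dict.mk ht) (-l) with
        | some b => b == false
        | none => false) = true)
      ↔ ((l > 0 ∧ (l, true) ∈ ht) ∨ (¬ l > 0 ∧ (-l, false) ∈ ht)) := by
  by_cases hl : l > 0
  · rw [if_pos hl]
    rcases hget : PySem.Dict.get? (PySem.Dict.mk ht) l with _ | b
    · simp only [hl, true_and, hl, not_true, false_and, or_false]
      constructor
      · intro h; cases h
      · intro h; rw [← pv_get?_eq ht hnd l true] at h; simp [hget] at h
    · rw [pv_get?_eq ht hnd l b] at hget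
      cases b
      · simp only [beq_iff_eq, Bool.false_eq_true, hl, true_and, not_true, false_and, or_false]
        constructor
        · intro h; cases h
        · intro h
          have h1 := (pv_get?_eq ht hnd l false).2 hget
          have h2 := (pv_get?_eq ht hnd l true).2 h
          rw [h1] at h2; cases h2
      · simp [hl, hget]
  · rw [if_neg hl]
    rcases hget : PySem.Dict.get? (PySem.Dict.mk ht) (-l) with _ | b
    · simp only [hl, false_and, not_false_iff, true_and, false_or]
      constructor
      · intro h; cases h
      · intro h; rw [← pv_get?_eq ht hnd (-l) false] at h; simp [hget] at h
    · rw [pv_get?_eq ht hnd (-l) b] at hget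
      cases b
      · simp [hl, hget]
      · simp only [beq_iff_eq, Bool.true_eq_false, hl, false_and, not_false_iff, true_and, false_or]
        constructor
        · intro h; cases h
        · intro h
          have h1 := (pv_get?_eq ht hnd (-l) false).2 h
          have h2 := (pv_get?_eq ht hnd (-l) true).2 hget
          rw [h1] at h2; cases h2

-- ===== VERDICT (by name: the statement is the Claim_ definition above) =====
theorem checkValidAnswer_spec : Claim_equal_checkValidAnswer := by
  intro cnf ht _ hpre
  unfold Pre_checkValidAnswer at hpre
  unfold Spec_checkValidAnswer checkValidAnswer checkValidAnswer_alt
  set g : Int → Bool := fun literal =>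
      if literal > 0 then
        match PySem.Dict.get? (PySem.Dict.mk ht) literal with
        | some b => b == true
        | none => false
      else
        match PySem.Dict.get? (PySem.Dict.mk ht) (-literal) with
        | some b => b == false
        | none => false with hgdef
  set SAT : PySem.Set Int :=
    ht.foldl
      (fun s kv =>
        if kv.2 then PySem.Set.update s ((pvBuildIdx cnf).1.getD kv.1 [])
        else PySem.Set.update s ((pvBuildIdx cnf).2.getD kv.1 []))
      PySem.Set.empty with hsatdef
  -- characterise SAT's members as the satisfied clause indices
  have hmem : ∀ j : Int, j ∈ SAT ↔
      ∃ k : Nat, ∃ _ : k < cnf.length, j = (k : Int) ∧ (cnf.getD k []).any g = true := by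
    intro j
    rw [hsatdef, pv_sat_mem]
    simp only [PySem.Set.empty, List.not_mem_nil, false_or]
    constructor
    · rintro ⟨kv, hkv, hin⟩
      by_cases hb : kv.2
      · rw [if_pos hb] at hin
        rcases (pv_outer cnf 0 (PySem.Dict.empty, PySem.Dict.empty) kv.1 j).1.1 hin with h | ⟨k, hk, hj, l, hl, hp, hv⟩
        · simp at h
        · refine ⟨k, hk, by simpa using hj, ?_⟩
          rw [List.any_eq_true]
          refine ⟨l, by rwa [List.getD_eq_getElem _ _ hk], ?_⟩
          rw [hgdef]
          simp only [if_pos hp]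
          have : PySem.Dict.get? (PySem.Dict.mk ht) l = some true := by
            rw [pv_get?_eq ht hpre]
            have : kv = (kv.1, true) := by
              obtain ⟨a, b⟩ := kv; simp at hb ⊢; exact hb
            rw [hv]; rw [this] at hkv; exact hkv
          rw [this]; rfl
      · rw [if_neg hb] at hin
        rcases (pv_outer cnf 0 (PySem.Dict.empty, PySem.Dict.empty) kv.1 j).2.1 hin with h | ⟨k, hk, hj, l, hl, hp, hv⟩
        · simp at h
        · refine ⟨k, hk, by simpa using hj, ?_⟩
          rw [List.any_eq_true]
          refine ⟨l, by rwa [List.getD_eq_getElem _ _ hk], ?_⟩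
          rw [hgdef]
          simp only [if_neg hp]
          have : PySem.Dict.get? (PySem.Dict.mk ht) (-l) = some false := by
            rw [pv_get?_eq ht hpre]
            have hkvb : kv = (kv.1, false) := by
              obtain ⟨a, b⟩ := kv; simp at hb ⊢; exact hb
            rw [hv]; rw [hkvb] at hkv; exact hkv
          rw [this]; rfl
    · rintro ⟨k, hk, hj, hany⟩
      rw [List.any_eq_true] at hany
      obtain ⟨l, hl, hgl⟩ := hany
      rw [List.getD_eq_getElem _ _ hk] at hl
      rcases (pv_lit_iff ht hpre l).1 hgl with ⟨hp, hmem⟩ | ⟨hp, hmem⟩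
      · refine ⟨(l, true), hmem, ?_⟩
        simp only [if_pos rfl]
        exact (pv_outer cnf 0 (PySem.Dict.empty, PySem.Dict.empty) l j).1.2
          (Or.inr ⟨k, hk, by simpa using hj, l, hl, hp, rfl⟩)
      · refine ⟨(-l, false), hmem, ?_⟩
        simp only [Bool.false_eq_true, if_false]
        exact (pv_outer cnf 0 (PySem.Dict.empty, PySem.Dict.empty) (-l) j).2.2
          (Or.inr ⟨k, hk, by simpa using hj, l, hl, hp, rfl⟩)
  -- SAT is a permutation of the filtered index list
  set T : List Nat := (List.range cnf.length).filter (fun k => (cnf.getD k []).any g) with hTdef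
  have hperm : SAT.Perm (List.map (fun k : Nat => (k : Int)) T) := by
    refine (List.perm_ext_iff_of_nodup ?_ ?_).2 ?_
    · rw [hsatdef]; exact pv_sat_nodup ht _ _ _ List.nodup_nil
    · exact (List.nodup_range.filter _).map Nat.cast_injective
    intro j
    rw [hmem j, List.mem_map]
    constructor
    · rintro ⟨k, hk, rfl, hany⟩
      exact ⟨k, by rw [hTdef, List.mem_filter, List.mem_range]; exact ⟨hk, hany⟩, rfl⟩
    · rintro ⟨k, hkT, rfl⟩
      rw [hTdef, List.mem_filter, List.mem_range] at hkT
      exact ⟨k, hkT.1, rfl, hkT.2⟩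
  have hlen : SAT.length = T.length := by
    rw [hperm.length_eq, List.length_map]
  -- reduce both sides to 'every clause index passes'
  have hA : (cnf.all (fun clause => clause.any g) = true) ↔ ∀ k (_ : k < cnf.length), (cnf.getD k []).any g = true := by
    rw [List.all_eq_true]
    constructor
    · intro h k hk
      rw [List.getD_eq_getElem _ _ hk]
      exact h _ (List.getElem_mem hk)
    · intro h clause hc
      obtain ⟨k, hk, rfl⟩ := List.getElem_of_mem hc
      rw [← List.getD_eq_getElem _ ([]) hk]
      exact h k hk
  have hB : (T.length = cnf.length) ↔ ∀ k (_ : k < cnf.length), (cnf.getD k []).any g = true := by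
    rw [hTdef]
    constructor
    · intro h k hk
      have := (List.length_filter_eq_length_iff.1 (by simpa using h)) k (List.mem_range.2 hk)
      simpa using this
    · intro h
      have : ∀ k ∈ List.range cnf.length, ((cnf.getD k []).any g) = true := by
        intro k hk; exact h k (List.mem_range.1 hk)
      rw [List.length_filter_eq_length_iff.2 this, List.length_range]
  rw [← Bool.coe_iff_coe]
  rw [hA]
  rw [beq_iff_eq, hlen, hB]
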